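-- pv_equiv track=rewrite | github.com/NREL/GEOPHIRES-X | src/geophires_x/EconomicsSamCashFlow.py | _clean_profile
-- ===== SOURCE A (Python) =====
-- from typing import Any
--
-- def _clean_profile(profile: list[list[Any]]) -> list[list[Any]]:
--     # Collapse consecutive blank rows
--     previous_line_was_blank = False
--     profile_cleaned = []
--     for pl in profile:
--         is_blank = all(it is None for it in pl)
--         if not (is_blank and previous_line_was_blank):
--             profile_cleaned.append(pl)
--         previous_line_was_blank = is_blank
--
--     return profile_cleaned
-- ===== SOURCE B (Python) =====
-- from itertools import groupby
-- from typing import Any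
--
--
-- def _clean_profile(profile: list[list[Any]]) -> list[list[Any]]:
--     # Collapse consecutive blank rows via run-length grouping
--     cleaned = []
--     for is_blank, group in groupby(profile, key=lambda r: all(it is None for it in r)):
--         if is_blank:
--             cleaned.append(next(iter(group)))
--         else:
--             cleaned.extend(group)
--     return cleaned
-- ===== Notes on version B (the rewrite author's own statement) =====
-- stated objective: idiomatic
-- what changed: Replaces the previous-row-was-blank flag loop with itertools.groupby over runs of equal blankness, keeping the first row of each blank run and all rows of each non-blank run.
import Mathlib
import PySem

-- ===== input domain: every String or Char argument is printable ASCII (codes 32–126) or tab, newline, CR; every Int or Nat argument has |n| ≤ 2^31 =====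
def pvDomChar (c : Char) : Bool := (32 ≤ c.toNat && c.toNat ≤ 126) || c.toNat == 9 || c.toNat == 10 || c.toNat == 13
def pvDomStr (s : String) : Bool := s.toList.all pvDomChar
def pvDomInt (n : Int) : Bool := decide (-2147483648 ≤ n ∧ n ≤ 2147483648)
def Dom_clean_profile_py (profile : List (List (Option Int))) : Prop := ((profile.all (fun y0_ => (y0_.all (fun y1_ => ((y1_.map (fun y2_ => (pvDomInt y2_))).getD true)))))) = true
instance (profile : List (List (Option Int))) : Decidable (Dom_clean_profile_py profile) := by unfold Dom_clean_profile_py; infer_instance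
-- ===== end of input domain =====

-- B groups consecutive rows of equal blankness (itertools.groupby) instead of A's previous-row-was-blank flag loop.

-- ===== PORT A =====
-- is_blank = all(it is None for it in pl)
def pvIsBlank (pl : List (Option Int)) : Bool := pl.all Option.isNone

-- the for-loop with state (previous_line_was_blank); rows are emitted front-to-back
def cleanLoopA (prev : Bool) : List (List (Option Int)) → List (List (Option Int))
  | [] => []
  | pl :: rest =>
    let b := pvIsBlank pl
    if !(b && prev) then pl :: cleanLoopA b rest else cleanLoopA b rest

def clean_profile_py (profile : List (List (Option Int))) : List (List (Option Int)) :=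
  cleanLoopA false profile

-- ===== PORT B =====
-- groupby: take the maximal run of rows with the same blankness as the head, keep the
-- first row of a blank run, the whole of a non-blank run, recurse on the remainder.
def clean_profile_py_alt (profile : List (List (Option Int))) : List (List (Option Int)) :=
  match profile with
  | [] => []
  | r :: rest =>
    let b := pvIsBlank r
    let grp := rest.takeWhile (fun x => pvIsBlank x == b)
    let rest' := rest.dropWhile (fun x => pvIsBlank x == b)
    if b then r :: clean_profile_py_alt rest' else (r :: grp) ++ clean_profile_py_alt rest'
termination_by profile.length
decreasing_by
  all_goals simpa using Nat.lt_succ_of_le (List.length_dropWhile_le _ _)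

-- ===== PRECONDITION & SPEC =====
def Spec_clean_profile_py (profile : List (List (Option Int))) (out : List (List (Option Int))) : Prop := out = clean_profile_py_alt profile
instance (profile : List (List (Option Int))) (out : List (List (Option Int))) : Decidable (Spec_clean_profile_py profile out) := by unfold Spec_clean_profile_py; infer_instance

-- ===== CLAIM (what is proved, stated in full; the proofs are below) =====
def Claim_equal_clean_profile_py : Prop := ∀ (profile : List (List (Option Int))), Dom_clean_profile_py profile → Spec_clean_profile_py profile (clean_profile_py profile)

-- ===== LEMMAS AND PROOFS =====

-- after a blank run, the flag value does not matter: the next row (if any) is non-blank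
theorem cleanLoopA_reset (l : List (List (Option Int)))
    (h : ∀ x ∈ l.head?, pvIsBlank x = false) (p : Bool) :
    cleanLoopA p l = cleanLoopA false l := by
  cases l with
  | nil => rfl
  | cons x xs =>
    have hx : pvIsBlank x = false := h x rfl
    simp [cleanLoopA, hx]

-- consuming a run of blank rows with the flag set drops the whole run
theorem cleanLoopA_blank_run (grp rest : List (List (Option Int)))
    (h : ∀ x ∈ grp, pvIsBlank x = true) :
    cleanLoopA true (grp ++ rest) = cleanLoopA true rest := by
  induction grp with
  | nil => rfl
  | cons x xs ih =>
    have hx : pvIsBlank x = true := h x (by simp)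
    simp [cleanLoopA, hx, ih (fun y hy => h y (by simp [hy]))]

-- consuming a run of non-blank rows keeps them all, leaving the flag false
theorem cleanLoopA_nonblank_run (grp rest : List (List (Option Int)))
    (h : ∀ x ∈ grp, pvIsBlank x = false) :
    cleanLoopA false (grp ++ rest) = grp ++ cleanLoopA false (grp ++ rest |>.drop grp.length) := by
  induction grp with
  | nil => simp
  | cons x xs ih =>
    have hx : pvIsBlank x = false := h x (by simp)
    simp [cleanLoopA, hx, ih (fun y hy => h y (by simp [hy]))]

theorem clean_eq_aux : ∀ (n : Nat) (profile : List (List (Option Int))),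
    profile.length ≤ n → cleanLoopA false profile = clean_profile_py_alt profile := by
  intro n
  induction n with
  | zero =>
    intro profile h
    have hnil : profile = [] := List.eq_nil_of_length_eq_zero (Nat.le_zero.mp h)
    subst hnil
    rw [clean_profile_py_alt]
    rfl
  | succ n ih =>
    intro profile h
    cases profile with
    | nil =>
      rw [clean_profile_py_alt]
      rfl
    | cons r rest =>
      rw [clean_profile_py_alt]
      have hsplit : rest = rest.takeWhile (fun x => pvIsBlank x == pvIsBlank r)
          ++ rest.dropWhile (fun x => pvIsBlank x == pvIsBlank r) :=
        (List.takeWhile_append_dropWhile).symm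
      have hgrp : ∀ x ∈ rest.takeWhile (fun x => pvIsBlank x == pvIsBlank r),
          pvIsBlank x = pvIsBlank r := by
        intro x hx
        have := List.mem_takeWhile_imp hx
        simpa using this
      have hrest' : ∀ x ∈ (rest.dropWhile (fun x => pvIsBlank x == pvIsBlank r)).head?,
          pvIsBlank x = !pvIsBlank r := by
        intro x hx
        cases hh : rest.dropWhile (fun x => pvIsBlank x == pvIsBlank r) with
        | nil => simp [hh] at hx
        | cons y ys =>
          have hy := List.head?_dropWhile_not (fun x => pvIsBlank x == pvIsBlank r) rest
          rw [hh] at hy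
          simp at hy
          rw [hh] at hx
          simp at hx
          subst hx
          simp [Bool.eq_not_iff, hy]
      have hlen : (rest.dropWhile (fun x => pvIsBlank x == pvIsBlank r)).length ≤ n := by
        have h1 := List.length_dropWhile_le (fun x => pvIsBlank x == pvIsBlank r) rest
        simp at h
        omega
      have ihr := ih _ hlen
      cases hb : pvIsBlank r with
      | true =>
        simp only [hb] at hsplit hgrp hrest' ihr ⊢
        conv_lhs => rw [cleanLoopA, hb]
        simp only [Bool.and_false, Bool.not_false]
        conv_lhs => rw [hsplit]
        rw [cleanLoopA_blank_run _ _ (fun x hx => by simpa using hgrp x hx)]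
        rw [cleanLoopA_reset _ (fun x hx => by simpa using hrest' x hx)]
        rw [ihr]
        simp
      | false =>
        simp only [hb] at hsplit hgrp hrest' ihr ⊢
        conv_lhs => rw [cleanLoopA, hb]
        simp only [Bool.false_and, Bool.not_false]
        conv_lhs => rw [hsplit]
        rw [cleanLoopA_nonblank_run _ _ (fun x hx => by simpa using hgrp x hx)]
        simp only [List.drop_left]
        rw [ihr]
        simp

-- ===== VERDICT (by name: the statement is the Claim_ definition above) =====
theorem clean_profile_py_spec : Claim_equal_clean_profile_py := by
  intro profile _
  unfold Spec_clean_profile_py clean_profile_py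
  exact clean_eq_aux profile.length profile le_rfl
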